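-- pv_equiv track=rewrite | github.com/NDiFonte/SProtein | md_sp_link_to_main.py | filter_redundant_paths
-- ===== SOURCE A (Python) =====
-- def filter_redundant_paths(paths):
--     """
--     Removes redundant paths from a list of paths. A path is considered redundant if it contains
--     the same destination node as a shorter path already in the list.
--
--     Args:
--         paths (list of list): A list of paths, where each path is a list of nodes.
--
--     Returns:
--         list of list: A list of non-redundant paths.
--     """
--     # Sort paths by length (shorter paths first)
--     paths = sorted(paths, key=len)
--
--     non_redundant = []
--     destination_set = set()  # Keeps track of arrival points already seen
--
--     for path in paths:
--         # Check the destination node (last node in the path)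
--         if path==[]:
--             continue
--         destination = path[-1]
--         if destination not in destination_set:
--             non_redundant.append(path)
--             destination_set.add(destination)  # Mark this destination as covered
--
--     return non_redundant,destination_set
-- ===== SOURCE B (Python) =====
-- def filter_redundant_paths(paths):
--     # One pass over the original list: keep, per destination, the earliest
--     # shortest path; then order the survivors by (length, original index).
--     best = {}
--     for i, path in enumerate(paths):
--         if not path:
--             continue
--         destination = path[-1]
--         kept = best.get(destination)
--         if kept is None or len(path) < len(kept[1]):
--             best[destination] = (i, path)
--     chosen = sorted(best.values(), key=lambda t: (len(t[1]), t[0]))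
--     result = [path for _, path in chosen]
--     return result, {path[-1] for path in result}
-- ===== Notes on version B (the rewrite author's own statement) =====
-- stated objective: alternative
-- what changed: Replaces A's sort-everything-then-scan-with-a-seen-set by a single dict pass over the original list keeping the earliest shortest path per destination, followed by one sort of the (at most one per destination) survivors by (length, original index).
import Mathlib
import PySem

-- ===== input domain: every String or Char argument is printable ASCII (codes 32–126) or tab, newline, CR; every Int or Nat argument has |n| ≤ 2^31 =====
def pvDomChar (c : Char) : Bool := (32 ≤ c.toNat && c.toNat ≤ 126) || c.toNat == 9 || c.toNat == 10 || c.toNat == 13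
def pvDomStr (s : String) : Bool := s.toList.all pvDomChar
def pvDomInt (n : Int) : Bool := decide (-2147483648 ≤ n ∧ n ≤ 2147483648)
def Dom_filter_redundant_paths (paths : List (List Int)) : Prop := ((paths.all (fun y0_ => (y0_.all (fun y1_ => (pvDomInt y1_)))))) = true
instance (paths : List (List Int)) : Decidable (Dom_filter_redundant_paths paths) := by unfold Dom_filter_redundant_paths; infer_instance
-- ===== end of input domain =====

-- B replaces A's sort-all-then-scan-with-a-seen-set by a single dict pass keeping the
-- earliest shortest path per destination, then one sort of the survivors (alternative
-- decomposition, same return value).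

-- ===== PORT A =====
def filter_redundant_paths (paths : List (List Int)) : List (List Int) × List Int :=
  let sortedPaths := PySem.List.sorted paths (fun p => PySem.List.len p)
  sortedPaths.foldl
    (fun (st : List (List Int) × PySem.Set Int) path =>
      if path = [] then st
      else
        if st.2.contains (PySem.List.pyGetD path (-1) 0) then st
        else (st.1 ++ [path], st.2.add (PySem.List.pyGetD path (-1) 0)))
    ([], PySem.Set.empty)

-- ===== PORT B =====
def filter_redundant_paths_alt (paths : List (List Int)) : List (List Int) × List Int :=
  let best := (PySem.List.enumerate paths 0).foldl
    (fun (best : PySem.Dict Int (Int × List Int)) ip =>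
      if ip.2 = [] then best
      else
        match best.get? (PySem.List.pyGetD ip.2 (-1) 0) with
        | none => best.insert (PySem.List.pyGetD ip.2 (-1) 0) ip
        | some kept =>
            if PySem.List.len ip.2 < PySem.List.len kept.2 then
              best.insert (PySem.List.pyGetD ip.2 (-1) 0) ip
            else best)
    PySem.Dict.empty
  let chosen := PySem.List.sorted2 best.values (fun t => PySem.List.len t.2) (fun t => t.1)
  let result := chosen.map (fun t => t.2)
  (result, PySem.Set.ofList (result.map (fun path => PySem.List.pyGetD path (-1) 0)))

-- ===== PRECONDITION & SPEC =====
def Spec_filter_redundant_paths (paths : List (List Int)) (out : List (List Int) × List Int) : Prop := out = filter_redundant_paths_alt paths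
instance (paths : List (List Int)) (out : List (List Int) × List Int) : Decidable (Spec_filter_redundant_paths paths out) := by unfold Spec_filter_redundant_paths; infer_instance

-- ===== CLAIM (what is proved, stated in full; the proofs are below) =====
def Claim_equal_filter_redundant_paths : Prop := ∀ (paths : List (List Int)), Dom_filter_redundant_paths paths → Spec_filter_redundant_paths paths (filter_redundant_paths paths)

-- ===== LEMMAS AND PROOFS =====

-- destination of a path, as both ports compute it
def pvDest (p : List Int) : Int := PySem.List.pyGetD p (-1) 0

-- the comparison sorted(paths, key=len) decides with
def pvB1 : List Int → List Int → Bool :=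
  fun a b => decide (PySem.List.len a < PySem.List.len b)

-- the lexicographic comparison sorted2(values, len∘snd, fst) decides with
def pvB2 : (Int × List Int) → (Int × List Int) → Bool :=
  fun a b => decide (PySem.List.len a.2 < PySem.List.len b.2) ||
    (!decide (PySem.List.len b.2 < PySem.List.len a.2) && decide (a.1 < b.1))

-- strict (length, index) order on enumerated paths
def pvLt (a b : Int × List Int) : Prop :=
  a.2.length < b.2.length ∨ (a.2.length = b.2.length ∧ a.1 < b.1)

-- B's dict step, as in the port
def pvStep (best : PySem.Dict Int (Int × List Int)) (ip : Int × List Int) :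
    PySem.Dict Int (Int × List Int) :=
  if ip.2 = [] then best
  else
    match best.get? (PySem.List.pyGetD ip.2 (-1) 0) with
    | none => best.insert (PySem.List.pyGetD ip.2 (-1) 0) ip
    | some kept =>
        if PySem.List.len ip.2 < PySem.List.len kept.2 then
          best.insert (PySem.List.pyGetD ip.2 (-1) 0) ip
        else best

-- A's scan, reified as a recursion on the (decorated) sorted list
def pvPick : List (Int × List Int) → PySem.Set Int → List (Int × List Int) × PySem.Set Int
  | [], seen => ([], seen)
  | t :: r, seen =>
    if t.2 = [] then pvPick r seen
    else if seen.contains (pvDest t.2) then pvPick r seen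
    else
      let rest := pvPick r (seen.add (pvDest t.2))
      (t :: rest.1, rest.2)

lemma pvB2_true_iff (a b : Int × List Int) : pvB2 a b = true ↔ pvLt a b := by
  simp only [pvB2, pvLt, PySem.List.len_eq, Bool.or_eq_true, Bool.and_eq_true,
    Bool.not_eq_eq_eq_not, Bool.not_true, decide_eq_true_eq, decide_eq_false_iff_not]
  omega


lemma pvB2_false_iff (a b : Int × List Int) :
    pvB2 b a = false ↔ (a.2.length ≤ b.2.length ∧ (b.2.length ≤ a.2.length → a.1 ≤ b.1)) := by
  simp only [pvB2, Bool.or_eq_false_iff, Bool.and_eq_false_iff, PySem.List.len_eq,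
    Bool.not_eq_eq_eq_not, Bool.not_false, decide_eq_false_iff_not,
    decide_eq_true_eq, not_lt]
  omega


lemma pvLt_asymm {a b : Int × List Int} : pvLt a b → ¬ pvLt b a := by
  simp only [pvLt]; omega


lemma pvLt_trans {a b c : Int × List Int} : pvLt a b → pvLt b c → pvLt a c := by
  simp only [pvLt]; omega


lemma pvFstInj {paths : List (List Int)} {u v : Int × List Int}
    (hu : u ∈ PySem.List.enumerate paths 0) (hv : v ∈ PySem.List.enumerate paths 0)
    (h : u.1 = v.1) : u = v := by
  rw [PySem.List.mem_enumerate_iff] at hu hv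
  obtain ⟨k, hk, rfl⟩ := hu
  obtain ⟨j, hj, rfl⟩ := hv
  simp only at h
  have : k = j := by omega
  subst this; rfl


lemma pvNodupE (paths : List (List Int)) : (PySem.List.enumerate paths 0).Nodup := by
  have h := PySem.List.pairwise_lt_enumerate paths 0
  exact h.imp (fun {a b} hab => by intro he; rw [he] at hab; omega)


-- stability: inserting a pair whose index exceeds every index in acc lands where its path lands
lemma pvInsertBy_snd (t : Int × List Int) (acc : List (Int × List Int))
    (h : ∀ u ∈ acc, u.1 < t.1) :
    (PySem.List.insertBy pvB2 t acc).map (·.2)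
      = PySem.List.insertBy pvB1 t.2 (acc.map (·.2)) := by
  induction acc with
  | nil => rfl
  | cons u r ih =>
    have hb : pvB2 t u = pvB1 t.2 u.2 := by
      have hu : decide (t.1 < u.1) = false := by
        simp only [decide_eq_false_iff_not, not_lt]
        exact le_of_lt (h u (by simp))
      simp [pvB2, pvB1, hu]
    rw [PySem.List.insertBy.eq_2, hb, List.map_cons, PySem.List.insertBy.eq_2]
    by_cases hc : pvB1 t.2 u.2 = true
    · simp [hc]
    · rw [Bool.not_eq_true] at hc
      simp only [hc, Bool.false_eq_true, if_false, List.map_cons]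
      rw [ih (fun v hv => h v (by simp [hv]))]


lemma pvFoldlInsertBy_snd (l : List (List Int)) :
    ∀ (s : Int) (acc : List (Int × List Int)), (∀ u ∈ acc, u.1 < s) →
    ((PySem.List.enumerate l s).foldl (fun acc x => PySem.List.insertBy pvB2 x acc) acc).map (·.2)
      = l.foldl (fun acc x => PySem.List.insertBy pvB1 x acc) (acc.map (·.2)) := by
  induction l with
  | nil => intro s acc h; simp [PySem.List.enumerate_nil]
  | cons p l ih =>
    intro s acc h
    rw [PySem.List.enumerate_cons]
    simp only [List.foldl_cons]
    rw [ih (s + 1) _ ?_, pvInsertBy_snd (s, p) acc (fun u hu => h u hu)]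
    intro u hu
    rcases (PySem.List.mem_insertBy _ _ _ _).mp hu with h1 | h2
    · rw [h1]; omega
    · have := h u h2; omega


lemma pvStability (paths : List (List Int)) :
    PySem.List.sorted paths (fun p => PySem.List.len p)
      = (PySem.List.sorted2 (PySem.List.enumerate paths 0)
          (fun t => PySem.List.len t.2) (fun t => t.1)).map (·.2) := by
  rw [PySem.List.sorted_eq_foldl_insertBy]
  have h := pvFoldlInsertBy_snd paths 0 [] (by simp)
  simp only [List.map_nil] at h
  exact h.symm


lemma pvSorted2_eq_foldl (xs : List (Int × List Int)) :
    PySem.List.sorted2 xs (fun t => PySem.List.len t.2) (fun t => t.1)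
      = xs.foldl (fun acc x => PySem.List.insertBy pvB2 x acc) [] := by
  rfl

-- insertion sort with pvB2 yields a weakly ordered list
lemma pvInsertBy_pairwise (x : Int × List Int) (ys : List (Int × List Int))
    (h : ys.Pairwise (fun a b => pvB2 b a = false)) :
    (PySem.List.insertBy pvB2 x ys).Pairwise (fun a b => pvB2 b a = false) := by
  have hchain : ∀ x y b : Int × List Int, pvB2 x y = true → pvB2 b y = false → pvB2 b x = false := by
    intro x y b hxy hby
    simp only [pvB2, PySem.List.len_eq, Bool.or_eq_true, Bool.and_eq_true,
      Bool.not_eq_eq_eq_not, Bool.not_true, decide_eq_true_eq, decide_eq_false_iff_not,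
      Bool.or_eq_false_iff, Bool.and_eq_false_iff, Bool.not_eq_eq_eq_not, Bool.not_false,
      not_lt] at hxy hby ⊢
    omega
  have hasym : ∀ x y : Int × List Int, pvB2 x y = true → pvB2 y x = false := by
    intro x y hxy
    have h1 := (pvB2_true_iff x y).mp hxy
    rw [← Bool.not_eq_true]
    intro hc
    exact pvLt_asymm h1 ((pvB2_true_iff y x).mp hc)
  induction ys with
  | nil => simp [PySem.List.insertBy.eq_1]
  | cons y r ih =>
    rw [List.pairwise_cons] at h
    rw [PySem.List.insertBy.eq_2]
    by_cases hc : pvB2 x y = true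
    · rw [if_pos hc]
      refine List.Pairwise.cons ?_ (List.Pairwise.cons h.1 h.2)
      intro b hb
      rcases List.mem_cons.mp hb with rfl | hbr
      · exact hasym x b hc
      · exact hchain x y b hc (h.1 b hbr)
    · rw [if_neg hc]
      refine List.Pairwise.cons ?_ (ih h.2)
      intro b hb
      rcases (PySem.List.mem_insertBy _ _ _ _).mp hb with rfl | hbr
      · exact Bool.not_eq_true _ ▸ hc
      · exact h.1 b hbr


lemma pvSorted2_pairwise (xs : List (Int × List Int)) :
    (PySem.List.sorted2 xs (fun t => PySem.List.len t.2) (fun t => t.1)).Pairwise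
      (fun a b => pvB2 b a = false) := by
  rw [pvSorted2_eq_foldl]
  have aux : ∀ (l acc : List (Int × List Int)),
      acc.Pairwise (fun a b => pvB2 b a = false) →
      (l.foldl (fun acc x => PySem.List.insertBy pvB2 x acc) acc).Pairwise
        (fun a b => pvB2 b a = false) := by
    intro l
    induction l with
    | nil => intro acc h; exact h
    | cons x r ih => intro acc h; exact ih _ (pvInsertBy_pairwise x acc h)
  exact aux _ [] (by simp)



-- A's fold over the decorated sorted list is pvPick
lemma pvFoldA_eq_pick (L : List (Int × List Int)) :
    ∀ (res : List (List Int)) (seen : PySem.Set Int),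
    L.foldl
      (fun (st : List (List Int) × PySem.Set Int) t =>
        if t.2 = [] then st
        else if st.2.contains (PySem.List.pyGetD t.2 (-1) 0) then st
        else (st.1 ++ [t.2], st.2.add (PySem.List.pyGetD t.2 (-1) 0)))
      (res, seen)
      = (res ++ ((pvPick L seen).1).map (·.2), (pvPick L seen).2) := by
  induction L with
  | nil => intro res seen; simp [pvPick]
  | cons t r ih =>
    intro res seen
    rw [List.foldl_cons, pvPick]
    by_cases h1 : t.2 = []
    · rw [if_pos h1]
      simp only [h1]
      exact ih res seen
    · rw [if_neg h1]
      simp only [h1, if_false]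
      by_cases h2 : seen.contains (pvDest t.2) = true
      · simp only [pvDest] at h2
        simp only [h2, if_true, pvDest]
        exact ih res seen
      · rw [Bool.not_eq_true] at h2
        simp only [pvDest] at h2
        simp only [h2, Bool.false_eq_true, if_false, pvDest]
        rw [ih (res ++ [t.2]) _]
        simp


lemma pvPick_snd (L : List (Int × List Int)) :
    ∀ seen, (pvPick L seen).2
      = ((pvPick L seen).1.map (fun t => pvDest t.2)).foldl PySem.Set.add seen := by
  induction L with
  | nil => intro seen; simp [pvPick]
  | cons t r ih =>
    intro seen
    rw [pvPick]
    by_cases h1 : t.2 = []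
    · rw [if_pos h1]; exact ih seen
    · rw [if_neg h1]
      by_cases h2 : seen.contains (pvDest t.2) = true
      · rw [if_pos h2]; exact ih seen
      · rw [Bool.not_eq_true] at h2
        rw [if_neg (by rw [h2]; exact Bool.false_ne_true)]
        simp only [List.map_cons, List.foldl_cons]
        exact ih _


lemma pvPick_sublist (L : List (Int × List Int)) :
    ∀ seen, (pvPick L seen).1.Sublist L := by
  induction L with
  | nil => intro seen; simp [pvPick]
  | cons t r ih =>
    intro seen
    rw [pvPick]
    by_cases h1 : t.2 = []
    · rw [if_pos h1]; exact (ih seen).cons t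
    · rw [if_neg h1]
      by_cases h2 : seen.contains (pvDest t.2) = true
      · rw [if_pos h2]; exact (ih seen).cons t
      · rw [Bool.not_eq_true] at h2
        rw [if_neg (by rw [h2]; exact Bool.false_ne_true)]
        exact (ih _).cons₂ t


lemma pvMem_pick (L : List (Int × List Int)) (hL : L.Pairwise pvLt) :
    ∀ (seen : PySem.Set Int) (t : Int × List Int),
    t ∈ (pvPick L seen).1 ↔
      t ∈ L ∧ t.2 ≠ [] ∧ pvDest t.2 ∉ seen ∧
        ∀ u ∈ L, u.2 ≠ [] → pvDest u.2 = pvDest t.2 → t = u ∨ pvLt t u := by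
  induction L with
  | nil => intro seen t; simp [pvPick]
  | cons h r ih =>
    rw [List.pairwise_cons] at hL
    intro seen t
    have hmemset : ∀ (s : PySem.Set Int) (x : Int), s.contains x = true ↔ x ∈ s :=
      fun s x => PySem.Set.contains_iff s x
    rw [pvPick]
    by_cases he : h.2 = []
    · rw [if_pos he, ih hL.2 seen t]
      constructor
      · rintro ⟨h1, h2, h3, h4⟩
        refine ⟨List.mem_cons_of_mem _ h1, h2, h3, ?_⟩
        intro u hu hune hud
        rcases List.mem_cons.mp hu with rfl | hur
        · exact absurd he hune
        · exact h4 u hur hune hud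
      · rintro ⟨h1, h2, h3, h4⟩
        rcases List.mem_cons.mp h1 with rfl | h1r
        · exact absurd he h2
        · exact ⟨h1r, h2, h3, fun u hu => h4 u (List.mem_cons_of_mem _ hu)⟩
    · rw [if_neg he]
      by_cases hc : seen.contains (pvDest h.2) = true
      · rw [if_pos hc, ih hL.2 seen t]
        have hcs : pvDest h.2 ∈ seen := (hmemset _ _).mp hc
        constructor
        · rintro ⟨h1, h2, h3, h4⟩
          refine ⟨List.mem_cons_of_mem _ h1, h2, h3, ?_⟩
          intro u hu hune hud
          rcases List.mem_cons.mp hu with rfl | hur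
          · exact absurd (hud ▸ hcs) h3
          · exact h4 u hur hune hud
        · rintro ⟨h1, h2, h3, h4⟩
          rcases List.mem_cons.mp h1 with rfl | h1r
          · exact absurd hcs h3
          · exact ⟨h1r, h2, h3, fun u hu => h4 u (List.mem_cons_of_mem _ hu)⟩
      · rw [Bool.not_eq_true] at hc
        rw [if_neg (by rw [hc]; exact Bool.false_ne_true)]
        have hcs : pvDest h.2 ∉ seen := fun hx => by
          rw [(hmemset _ _).mpr hx] at hc; exact Bool.noConfusion hc
        simp only [List.mem_cons]
        constructor
        · rintro (rfl | hrest)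
          · refine ⟨Or.inl rfl, he, hcs, ?_⟩
            intro u hu hune hud
            rcases hu with rfl | hur
            · exact Or.inl rfl
            · exact Or.inr (hL.1 u hur)
          · obtain ⟨h1, h2, h3, h4⟩ := (ih hL.2 _ t).mp hrest
            have hdne : pvDest t.2 ≠ pvDest h.2 := by
              intro hx
              exact h3 ((PySem.Set.mem_add seen (pvDest h.2) (pvDest t.2)).mpr (Or.inr hx))
            have h3' : pvDest t.2 ∉ seen := fun hx =>
              h3 ((PySem.Set.mem_add seen (pvDest h.2) (pvDest t.2)).mpr (Or.inl hx))
            refine ⟨Or.inr h1, h2, h3', ?_⟩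
            intro u hu hune hud
            rcases hu with rfl | hur
            · exact absurd hud.symm hdne
            · exact h4 u hur hune hud
        · rintro ⟨h1, h2, h3, h4⟩
          by_cases hth : t = h
          · exact Or.inl hth
          · rcases h1 with rfl | h1r
            · exact absurd rfl hth
            · refine Or.inr ((ih hL.2 _ t).mpr ⟨h1r, h2, ?_, ?_⟩)
              · intro hx
                rcases (PySem.Set.mem_add seen (pvDest h.2) (pvDest t.2)).mp hx with hx1 | hx2
                · exact h3 hx1
                · rcases h4 h (Or.inl rfl) he hx2.symm with rfl | hlt
                  · exact hth rfl
                  · exact pvLt_asymm (hL.1 t h1r) hlt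
              · intro u hu hune hud
                exact h4 u (Or.inr hu) hune hud


-- invariant of B's dict pass
def pvGood (pre : List (Int × List Int)) (d : PySem.Dict Int (Int × List Int)) : Prop :=
  (∀ kv ∈ d.items, kv.2 ∈ pre ∧ kv.2.2 ≠ [] ∧ pvDest kv.2.2 = kv.1 ∧
      ∀ u ∈ pre, u.2 ≠ [] → pvDest u.2 = kv.1 → kv.2 = u ∨ pvLt kv.2 u) ∧
  (∀ u ∈ pre, u.2 ≠ [] → pvDest u.2 ∈ d.keys) ∧
  d.keys.Nodup

lemma pvStep_good {pre : List (Int × List Int)} {d : PySem.Dict Int (Int × List Int)}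
    {t : Int × List Int} (hg : pvGood pre d) (hlt : ∀ u ∈ pre, u.1 < t.1) :
    pvGood (pre ++ [t]) (pvStep d t) := by
  obtain ⟨hitems, hcover, hnodup⟩ := hg
  by_cases he : t.2 = []
  · unfold pvStep; rw [if_pos he]
    refine ⟨?_, ?_, hnodup⟩
    · intro kv hkv
      obtain ⟨h1, h2, h3, h4⟩ := hitems kv hkv
      refine ⟨List.mem_append_left _ h1, h2, h3, ?_⟩
      intro u hu hune hud
      rcases List.mem_append.mp hu with hu1 | hu2
      · exact h4 u hu1 hune hud
      · rw [List.mem_singleton] at hu2; subst hu2; exact absurd he hune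
    · intro u hu hune
      rcases List.mem_append.mp hu with hu1 | hu2
      · exact hcover u hu1 hune
      · rw [List.mem_singleton] at hu2; subst hu2; exact absurd he hune
  · unfold pvStep; rw [if_neg he]
    have hdd : PySem.List.pyGetD t.2 (-1) 0 = pvDest t.2 := rfl
    rw [hdd]
    cases hget : d.get? (pvDest t.2) with
    | none =>
      have hcont : d.contains (pvDest t.2) = false :=
        (PySem.Dict.get?_eq_none_iff_contains d _).mp hget
      have hnotk : pvDest t.2 ∉ d.keys := by
        intro hk
        rw [(PySem.Dict.contains_iff_mem_keys d _).mpr hk] at hcont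
        exact Bool.noConfusion hcont
      have hitems' := PySem.Dict.items_insert_of_not_contains d t hcont
      refine ⟨?_, ?_, PySem.Dict.nodup_keys_insert d _ t hnodup⟩
      · intro kv hkv
        rw [hitems', List.mem_append] at hkv
        rcases hkv with hkv | hkv
        · obtain ⟨h1, h2, h3, h4⟩ := hitems kv hkv
          refine ⟨List.mem_append_left _ h1, h2, h3, ?_⟩
          intro u hu hune hud
          rcases List.mem_append.mp hu with hu1 | hu2
          · exact h4 u hu1 hune hud
          · rw [List.mem_singleton] at hu2; subst hu2
            have hmk := PySem.Dict.mem_keys_of_mem_items d hkv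
            rw [← hud] at hmk
            exact absurd hmk hnotk
        · rw [List.mem_singleton] at hkv; subst hkv
          refine ⟨List.mem_append_right _ (List.mem_singleton_self t), he, rfl, ?_⟩
          intro u hu hune hud
          rcases List.mem_append.mp hu with hu1 | hu2
          · have := hcover u hu1 hune
            simp only at hud
            rw [hud] at this
            exact absurd this hnotk
          · rw [List.mem_singleton] at hu2; subst hu2; exact Or.inl rfl
      · intro u hu hune
        have hkeys' : (d.insert (pvDest t.2) t).keys = d.keys ++ [pvDest t.2] := by
          rw [PySem.Dict.keys.eq_1, hitems', List.map_append, ← PySem.Dict.keys.eq_1]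
          rfl
        rw [hkeys']
        rcases List.mem_append.mp hu with hu1 | hu2
        · exact List.mem_append_left _ (hcover u hu1 hune)
        · rw [List.mem_singleton] at hu2; subst hu2
          exact List.mem_append_right _ (List.mem_singleton_self _)
    | some kept =>
      have hmem : (pvDest t.2, kept) ∈ d.items := PySem.Dict.mem_items_of_get?_eq_some d hget
      obtain ⟨hk1, hk2, hk3, hk4⟩ := hitems _ hmem
      have hcont : d.contains (pvDest t.2) = true := by
        rw [PySem.Dict.contains_iff_mem_keys]
        exact PySem.Dict.mem_keys_of_mem_items d hmem
      have huniq : ∀ kv ∈ d.items, kv.1 = pvDest t.2 → kv.2 = kept := by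
        intro kv hkv hk
        have hq : d.get? kv.1 = some kv.2 :=
          PySem.Dict.get?_of_mem_items d (by rw [Prod.mk.eta]; exact hkv) hnodup
        rw [hk, hget] at hq
        exact (Option.some.inj hq).symm
      change pvGood (pre ++ [t]) (if PySem.List.len t.2 < PySem.List.len kept.2 then d.insert (pvDest t.2) t else d)
      by_cases hlen : PySem.List.len t.2 < PySem.List.len kept.2
      · rw [if_pos hlen]
        have hltk : pvLt t kept := by
          rw [PySem.List.len_eq, PySem.List.len_eq] at hlen
          exact Or.inl (by exact_mod_cast hlen)
        have hitems' := PySem.Dict.items_insert_of_contains d t hcont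
        have hkeys' : (d.insert (pvDest t.2) t).keys = d.keys := by
          rw [PySem.Dict.keys.eq_1, hitems', List.map_map, PySem.Dict.keys.eq_1]
          apply List.map_congr_left
          intro p hp
          by_cases hpk : p.1 == pvDest t.2
          · simp only [Function.comp, hpk, if_true]
            exact (eq_of_beq hpk).symm
          · simp [Function.comp, hpk]
        refine ⟨?_, ?_, by rw [hkeys']; exact hnodup⟩
        · intro kv hkv
          rw [hitems', List.mem_map] at hkv
          obtain ⟨p, hp, rfl⟩ := hkv
          by_cases hpk : p.1 == pvDest t.2
          · rw [if_pos hpk]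
            refine ⟨List.mem_append_right _ (List.mem_singleton_self t), he, rfl, ?_⟩
            intro u hu hune hud
            replace hud : pvDest u.2 = pvDest t.2 := hud
            rcases List.mem_append.mp hu with hu1 | hu2
            · rcases hk4 u hu1 hune hud with rfl | hlt2
              · exact Or.inr hltk
              · exact Or.inr (pvLt_trans hltk hlt2)
            · rw [List.mem_singleton] at hu2; subst hu2; exact Or.inl rfl
          · rw [if_neg hpk]
            obtain ⟨h1, h2, h3, h4⟩ := hitems p hp
            refine ⟨List.mem_append_left _ h1, h2, h3, ?_⟩
            intro u hu hune hud
            rcases List.mem_append.mp hu with hu1 | hu2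
            · exact h4 u hu1 hune hud
            · rw [List.mem_singleton] at hu2; subst hu2
              exact absurd hud.symm (by simpa using hpk)
        · intro u hu hune
          rw [hkeys']
          rcases List.mem_append.mp hu with hu1 | hu2
          · exact hcover u hu1 hune
          · rw [List.mem_singleton] at hu2; subst hu2
            exact (PySem.Dict.contains_iff_mem_keys d _).mp hcont
      · rw [if_neg hlen]
        refine ⟨?_, ?_, hnodup⟩
        · intro kv hkv
          obtain ⟨h1, h2, h3, h4⟩ := hitems kv hkv
          refine ⟨List.mem_append_left _ h1, h2, h3, ?_⟩
          intro u hu hune hud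
          rcases List.mem_append.mp hu with hu1 | hu2
          · exact h4 u hu1 hune hud
          · rw [List.mem_singleton] at hu2; subst hu2
            rw [huniq kv hkv hud.symm]
            right
            have hklt := hlt kept hk1
            rw [PySem.List.len_eq, PySem.List.len_eq, not_lt] at hlen
            unfold pvLt
            omega
        · intro u hu hune
          rcases List.mem_append.mp hu with hu1 | hu2
          · exact hcover u hu1 hune
          · rw [List.mem_singleton] at hu2; subst hu2
            exact (PySem.Dict.contains_iff_mem_keys d _).mp hcont


lemma pvFold_good (l : List (List Int)) :
    ∀ (s : Int) (d : PySem.Dict Int (Int × List Int)) (pre : List (Int × List Int)),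
    pvGood pre d → (∀ u ∈ pre, u.1 < s) →
    pvGood (pre ++ PySem.List.enumerate l s) ((PySem.List.enumerate l s).foldl pvStep d) := by
  induction l with
  | nil => intro s d pre hg _; simpa [PySem.List.enumerate_nil] using hg
  | cons p l ih =>
    intro s d pre hg hlt
    rw [PySem.List.enumerate_cons]
    simp only [List.foldl_cons]
    have hg' := pvStep_good (t := (s, p)) hg hlt
    have := ih (s + 1) (pvStep d (s, p)) (pre ++ [(s, p)]) hg' ?_
    · rw [List.append_assoc] at this
      simpa using this
    · intro u hu
      rcases List.mem_append.mp hu with hu1 | hu2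
      · have := hlt u hu1; omega
      · rw [List.mem_singleton] at hu2; subst hu2; omega


lemma pvGoodE (paths : List (List Int)) :
    pvGood (PySem.List.enumerate paths 0)
      ((PySem.List.enumerate paths 0).foldl pvStep PySem.Dict.empty) := by
  have h := pvFold_good paths 0 PySem.Dict.empty [] ?_ (by simp)
  · simpa using h
  · refine ⟨?_, ?_, PySem.Dict.nodup_keys_empty⟩
    · intro kv hkv
      rw [PySem.Dict.empty.eq_1] at hkv
      exact absurd hkv (List.not_mem_nil)
    · intro u hu
      exact absurd hu (List.not_mem_nil)


lemma pvMem_values (paths : List (List Int)) (v : Int × List Int) :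
    v ∈ ((PySem.List.enumerate paths 0).foldl pvStep PySem.Dict.empty).values ↔
      v ∈ PySem.List.enumerate paths 0 ∧ v.2 ≠ [] ∧
        ∀ u ∈ PySem.List.enumerate paths 0, u.2 ≠ [] → pvDest u.2 = pvDest v.2 →
          v = u ∨ pvLt v u := by
  obtain ⟨hitems, hcover, hnodup⟩ := pvGoodE paths
  set d := (PySem.List.enumerate paths 0).foldl pvStep PySem.Dict.empty with hd
  rw [PySem.Dict.values.eq_1, List.mem_map]
  constructor
  · rintro ⟨kv, hkv, rfl⟩
    obtain ⟨h1, h2, h3, h4⟩ := hitems kv hkv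
    exact ⟨h1, h2, fun u hu hune hud => h4 u hu hune (h3 ▸ hud)⟩
  · rintro ⟨h1, h2, h3⟩
    have hk := hcover v h1 h2
    rw [PySem.Dict.keys.eq_1, List.mem_map] at hk
    obtain ⟨kv, hkv, hfst⟩ := hk
    obtain ⟨g1, g2, g3, g4⟩ := hitems kv hkv
    have ha : v = kv.2 ∨ pvLt v kv.2 := h3 kv.2 g1 g2 (by rw [g3, hfst])
    have hb : kv.2 = v ∨ pvLt kv.2 v := g4 v h1 h2 (by rw [← hfst])
    refine ⟨kv, hkv, ?_⟩
    rcases ha with ha | ha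
    · exact ha.symm
    · rcases hb with hb | hb
      · exact hb
      · exact absurd hb (pvLt_asymm ha)


lemma pvValues_nodup (paths : List (List Int)) :
    ((PySem.List.enumerate paths 0).foldl pvStep PySem.Dict.empty).values.Nodup := by
  obtain ⟨hitems, hcover, hnodup⟩ := pvGoodE paths
  rw [PySem.Dict.values.eq_1]
  refine List.Nodup.map_on ?_ ?_
  · intro x hx y hy hxy
    obtain ⟨-, -, hx3, -⟩ := hitems x hx
    obtain ⟨-, -, hy3, -⟩ := hitems y hy
    have : x.1 = y.1 := by rw [← hx3, ← hy3, hxy]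
    exact Prod.ext this hxy
  · rw [PySem.Dict.keys.eq_1] at hnodup
    exact List.Nodup.of_map _ hnodup


lemma pvKept_eq_chosen (paths : List (List Int)) :
    (pvPick (PySem.List.sorted2 (PySem.List.enumerate paths 0)
        (fun t => PySem.List.len t.2) (fun t => t.1)) PySem.Set.empty).1
      = PySem.List.sorted2
          ((PySem.List.enumerate paths 0).foldl pvStep PySem.Dict.empty).values
          (fun t => PySem.List.len t.2) (fun t => t.1) := by
  have hD0perm : (PySem.List.sorted2 (PySem.List.enumerate paths 0)
      (fun t => PySem.List.len t.2) (fun t => t.1)).Perm (PySem.List.enumerate paths 0) :=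
    PySem.List.sorted2_perm _ _ _ _
  have hD0mem : ∀ {x : Int × List Int}, x ∈ PySem.List.sorted2 (PySem.List.enumerate paths 0)
      (fun t => PySem.List.len t.2) (fun t => t.1) ↔ x ∈ PySem.List.enumerate paths 0 :=
    fun {x} => hD0perm.mem_iff
  have hnodE := pvNodupE paths
  have hD0nodup := hD0perm.nodup_iff.mpr hnodE
  have hstrict : (PySem.List.sorted2 (PySem.List.enumerate paths 0)
      (fun t => PySem.List.len t.2) (fun t => t.1)).Pairwise pvLt := by
    refine ((pvSorted2_pairwise (PySem.List.enumerate paths 0)).and hD0nodup).imp_of_mem ?_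
    intro a b ha hb hab
    obtain ⟨hw, hne⟩ := hab
    rw [pvB2_false_iff] at hw
    by_cases hl : a.2.length < b.2.length
    · exact Or.inl hl
    · have hlen : a.2.length = b.2.length := by omega
      have hfst : a.1 ≤ b.1 := hw.2 (by omega)
      have hne' : a.1 ≠ b.1 := fun hx => hne (pvFstInj (hD0mem.mp ha) (hD0mem.mp hb) hx)
      exact Or.inr ⟨hlen, lt_of_le_of_ne hfst hne'⟩
  have hkeptmem : ∀ t, t ∈ (pvPick (PySem.List.sorted2 (PySem.List.enumerate paths 0)
      (fun t => PySem.List.len t.2) (fun t => t.1)) PySem.Set.empty).1 ↔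
      (t ∈ PySem.List.enumerate paths 0 ∧ t.2 ≠ [] ∧
        ∀ u ∈ PySem.List.enumerate paths 0, u.2 ≠ [] → pvDest u.2 = pvDest t.2 →
          t = u ∨ pvLt t u) := by
    intro t
    rw [pvMem_pick _ hstrict PySem.Set.empty t, PySem.Set.empty_eq]
    constructor
    · rintro ⟨h1, h2, _, h4⟩
      exact ⟨hD0mem.mp h1, h2, fun u hu => h4 u (hD0mem.mpr hu)⟩
    · rintro ⟨h1, h2, h3⟩
      exact ⟨hD0mem.mpr h1, h2, by simp, fun u hu => h3 u (hD0mem.mp hu)⟩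
  have hkept_nodup := (pvPick_sublist _ PySem.Set.empty).nodup hD0nodup
  have hvals_nodup := pvValues_nodup paths
  have hperm1 : (pvPick (PySem.List.sorted2 (PySem.List.enumerate paths 0)
      (fun t => PySem.List.len t.2) (fun t => t.1)) PySem.Set.empty).1.Perm
      ((PySem.List.enumerate paths 0).foldl pvStep PySem.Dict.empty).values := by
    rw [List.perm_ext_iff_of_nodup hkept_nodup hvals_nodup]
    intro a
    rw [hkeptmem a, pvMem_values paths a]
  have hchosenperm := PySem.List.sorted2_perm
    ((PySem.List.enumerate paths 0).foldl pvStep PySem.Dict.empty).values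
    (fun t : Int × List Int => PySem.List.len t.2) (fun t => t.1) false
  have hperm := hperm1.trans hchosenperm.symm
  have hkept_pw : (pvPick (PySem.List.sorted2 (PySem.List.enumerate paths 0)
      (fun t => PySem.List.len t.2) (fun t => t.1)) PySem.Set.empty).1.Pairwise
      (fun a b => pvB2 b a = false) := by
    refine (hstrict.sublist (pvPick_sublist _ PySem.Set.empty)).imp ?_
    intro a b hab
    rw [← Bool.not_eq_true]
    intro hx
    exact pvLt_asymm hab ((pvB2_true_iff _ _).mp hx)
  have hchosen_pw := pvSorted2_pairwise
    ((PySem.List.enumerate paths 0).foldl pvStep PySem.Dict.empty).values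
  refine List.Perm.eq_of_pairwise ?_ hkept_pw hchosen_pw hperm
  intro a b ha hb hab hba
  have haE : a ∈ PySem.List.enumerate paths 0 := ((hkeptmem a).mp ha).1
  have hbE : b ∈ PySem.List.enumerate paths 0 :=
    ((pvMem_values paths b).mp (hchosenperm.mem_iff.mp hb)).1
  rw [pvB2_false_iff] at hab hba
  refine pvFstInj haE hbE ?_
  omega


lemma pvA_eq (paths : List (List Int)) :
    filter_redundant_paths paths
      = (((pvPick (PySem.List.sorted2 (PySem.List.enumerate paths 0)
            (fun t => PySem.List.len t.2) (fun t => t.1)) PySem.Set.empty).1).map (·.2),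
         (pvPick (PySem.List.sorted2 (PySem.List.enumerate paths 0)
            (fun t => PySem.List.len t.2) (fun t => t.1)) PySem.Set.empty).2) := by
  show (PySem.List.sorted paths (fun p => PySem.List.len p)).foldl
      (fun (st : List (List Int) × PySem.Set Int) path =>
        if path = [] then st
        else
          if st.2.contains (PySem.List.pyGetD path (-1) 0) then st
          else (st.1 ++ [path], st.2.add (PySem.List.pyGetD path (-1) 0)))
      ([], PySem.Set.empty) = _
  rw [pvStability paths, List.foldl_map]
  have h := pvFoldA_eq_pick (PySem.List.sorted2 (PySem.List.enumerate paths 0)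
    (fun t => PySem.List.len t.2) (fun t => t.1)) [] PySem.Set.empty
  rw [List.nil_append] at h
  exact h

-- ===== VERDICT (by name: the statement is the Claim_ definition above) =====
theorem filter_redundant_paths_spec : Claim_equal_filter_redundant_paths := by
  intro paths _
  unfold Spec_filter_redundant_paths
  rw [pvA_eq paths]
  show _ = (((PySem.List.sorted2 ((PySem.List.enumerate paths 0).foldl pvStep PySem.Dict.empty).values
      (fun t => PySem.List.len t.2) (fun t => t.1)).map (fun t => t.2)),
    PySem.Set.ofList (((PySem.List.sorted2 ((PySem.List.enumerate paths 0).foldl pvStep PySem.Dict.empty).values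
      (fun t => PySem.List.len t.2) (fun t => t.1)).map (fun t => t.2)).map
        (fun path => PySem.List.pyGetD path (-1) 0)))
  rw [← pvKept_eq_chosen paths]
  refine Prod.ext rfl ?_
  rw [pvPick_snd, PySem.Set.empty_eq, PySem.Set.ofList_eq_foldl, List.map_map]
  rfl
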